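-- pv_equiv track=rewrite | github.com/VityaRolex/BatLabGitHub | drobi_arithm.py | moveToFirstNNS
-- ===== SOURCE A (Python) =====
-- def moveToFirstNNS(str):
--     i = 0
--     if len(str) == 0:
--         return ''
--     while '0' <= str[i] <= '9' or str[i] == ' ':
--         i += 1
--         if i == len(str):
--             return ''
--     return str[i:]
-- ===== SOURCE B (Python) =====
-- import re
--
-- def moveToFirstNNS(str):
--     m = re.match(r'[0-9 ]*', str)
--     return str[m.end():]
-- ===== Notes on version B (the rewrite author's own statement) =====
-- stated objective: idiomatic
-- what changed: Replaced the manual index loop with boundary checks by a single anchored regex match on the character class [0-9 ] and one slice from the match end.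
import Mathlib
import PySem

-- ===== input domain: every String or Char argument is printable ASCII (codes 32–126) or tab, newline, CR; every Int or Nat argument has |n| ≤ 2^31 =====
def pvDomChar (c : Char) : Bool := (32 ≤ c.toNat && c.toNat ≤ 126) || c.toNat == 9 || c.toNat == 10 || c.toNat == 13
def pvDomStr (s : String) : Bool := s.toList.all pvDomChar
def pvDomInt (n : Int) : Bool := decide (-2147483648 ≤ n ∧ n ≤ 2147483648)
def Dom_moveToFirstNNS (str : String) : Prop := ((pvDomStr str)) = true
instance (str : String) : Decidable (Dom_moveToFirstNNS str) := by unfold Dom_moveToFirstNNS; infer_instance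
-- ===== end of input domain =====

-- B replaces A's manual index loop by one anchored regex match on [0-9 ] and a slice (idiomatic; same O(n) cost).

-- ===== PORT A =====
-- A's while loop over an index i, comparing str[i] and checking i == len(str) after each increment.
def moveToFirstNNSLoopA (cs : List Char) (i : Nat) : String :=
  if hlt : i < cs.length then
    let c := cs[i]
    if ('0' ≤ c ∧ c ≤ '9') ∨ c = ' ' then
      if i + 1 = cs.length then ""
      else moveToFirstNNSLoopA cs (i + 1)
    else String.ofList (cs.drop i)   -- str[i:]
  else ""   -- unreachable when the loop is entered with i < len, kept for totality
termination_by cs.length - i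

def moveToFirstNNS (str : String) : String :=
  if str.toList.length = 0 then "" else moveToFirstNNSLoopA str.toList 0

-- ===== PORT B =====
-- re.match(r'[0-9 ]*', str) greedily consumes the leading run of chars in the class [0-9 ];
-- ported exactly as dropWhile of that class; str[m.end():] is the remaining suffix.
def moveToFirstNNS_alt (str : String) : String :=
  String.ofList (str.toList.dropWhile (fun c => ('0' ≤ c && c ≤ '9') || c == ' '))

-- ===== PRECONDITION & SPEC =====
def Spec_moveToFirstNNS (str : String) (out : String) : Prop := out = moveToFirstNNS_alt str
instance (str : String) (out : String) : Decidable (Spec_moveToFirstNNS str out) := by unfold Spec_moveToFirstNNS; infer_instance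

-- ===== CLAIM (what is proved, stated in full; the proofs are below) =====
def Claim_equal_moveToFirstNNS : Prop := ∀ (str : String), Dom_moveToFirstNNS str → Spec_moveToFirstNNS str (moveToFirstNNS str)

-- ===== LEMMAS AND PROOFS =====
theorem loopA_eq_dropWhile (cs : List Char) (i : Nat) (hi : i < cs.length) :
    moveToFirstNNSLoopA cs i =
      String.ofList ((cs.drop i).dropWhile (fun c => ('0' ≤ c && c ≤ '9') || c == ' ')) := by
  induction hn : cs.length - i using Nat.strong_induction_on generalizing i with
  | _ n ih =>
  have hdrop : cs.drop i = cs[i] :: cs.drop (i + 1) := List.drop_eq_getElem_cons hi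
  rw [moveToFirstNNSLoopA]
  rw [dif_pos hi]
  show (if ('0' ≤ cs[i] ∧ cs[i] ≤ '9') ∨ cs[i] = ' ' then
      if i + 1 = cs.length then "" else moveToFirstNNSLoopA cs (i + 1)
    else String.ofList (cs.drop i)) = _
  by_cases hpb : (('0' ≤ cs[i] && cs[i] ≤ '9') || cs[i] == ' ') = true
  · have hp : ('0' ≤ cs[i] ∧ cs[i] ≤ '9') ∨ cs[i] = ' ' := by
      simpa only [Bool.or_eq_true, Bool.and_eq_true, decide_eq_true_eq, beq_iff_eq] using hpb
    rw [if_pos hp, hdrop]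
    simp only [List.dropWhile_cons, hpb, if_true]
    by_cases hend : i + 1 = cs.length
    · rw [if_pos hend]
      have hnil : cs.drop (i + 1) = [] := by rw [hend]; simp
      rw [hnil]; rfl
    · rw [if_neg hend]
      have hi' : i + 1 < cs.length := by omega
      exact ih (cs.length - (i + 1)) (by omega) (i + 1) hi' rfl
  · have hp : ¬ (('0' ≤ cs[i] ∧ cs[i] ≤ '9') ∨ cs[i] = ' ') := by
      simp only [Bool.or_eq_true, Bool.and_eq_true, decide_eq_true_eq, beq_iff_eq] at hpb
      exact hpb
    have hpf : (('0' ≤ cs[i] && cs[i] ≤ '9') || cs[i] == ' ') = false :=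
      Bool.eq_false_iff.mpr hpb
    rw [if_neg hp]
    conv_rhs => rw [hdrop]
    simp only [List.dropWhile_cons, hpf]
    rw [hdrop]
    simp

-- ===== VERDICT (by name: the statement is the Claim_ definition above) =====
theorem moveToFirstNNS_spec : Claim_equal_moveToFirstNNS := by
  intro str _
  unfold Spec_moveToFirstNNS moveToFirstNNS moveToFirstNNS_alt
  by_cases h : str.toList.length = 0
  · rw [if_pos h]
    have : str.toList = [] := List.length_eq_zero_iff.mp h
    rw [this]; rfl
  · rw [if_neg h]
    have := loopA_eq_dropWhile str.toList 0 (by omega)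
    simpa using this
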